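-- pv_equiv track=rewrite | github.com/Infinus-77/NeuroLearn | utils/story_generator.py | clean_json
-- ===== SOURCE A (Python) =====
-- def clean_json(raw_text):
--     """Extract valid JSON from AI response."""
--     if not raw_text:
--         return "{}"
--
--     if "```json" in raw_text:
--         raw_text = raw_text.split("```json")[-1].split("```")[0]
--     elif "```" in raw_text:
--         parts = raw_text.split("```")
--         raw_text = parts[1] if len(parts) >= 3 else parts[-1]
--
--     raw_text = raw_text.strip().lstrip('`\'"').rstrip('`\'"')
--
--     # Fix newlines inside strings
--     result = []
--     in_string = False
--     i = 0
--     while i < len(raw_text):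
--         char = raw_text[i]
--         if char == '\\' and in_string and i + 1 < len(raw_text):
--             next_char = raw_text[i + 1]
--             if next_char in ['"', '\\', '/', 'b', 'f', 'n', 'r', 't', 'u']:
--                 result.append(char)
--                 result.append(next_char)
--                 i += 2
--                 continue
--         if char == '"':
--             num_bs = 0
--             for j in range(len(result) - 1, -1, -1):
--                 if result[j] == '\\':
--                     num_bs += 1
--                 else:
--                     break
--             if num_bs % 2 == 0:
--                 in_string = not in_string
--             result.append(char)
--         elif in_string and char == '\n':
--             result.append('\\n')
--         elif in_string and char == '\r':
--             pass
--         elif in_string and char == '\t':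
--             result.append('\\t')
--         elif not in_string and char in ['\n', '\r', '\t']:
--             pass
--         else:
--             result.append(char)
--         i += 1
--
--     cleaned = "".join(result).strip()
--     if not cleaned.startswith('{') and not cleaned.startswith('['):
--         cleaned = '{}'
--     return cleaned
-- ===== SOURCE B (Python) =====
-- ESCAPES = '"\\/bfnrtu'
--
-- def clean_json(raw_text):
--     """Extract valid JSON from AI response. Two-state scanner: a separate
--     outside-string loop and inside-string loop with an incremental
--     backslash-run parity, instead of a flag-driven loop that rescans the
--     output backwards at every quote."""
--     if not raw_text:
--         return "{}"
--
--     if "```json" in raw_text: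
--         raw_text = raw_text.split("```json")[-1].split("```")[0]
--     elif "```" in raw_text:
--         parts = raw_text.split("```")
--         raw_text = parts[1] if len(parts) >= 3 else parts[-1]
--
--     s = raw_text.strip().lstrip('`\'"').rstrip('`\'"')
--     n = len(s)
--     out = []
--     i = 0
--     while True:
--         # --- outside a string: copy until a quote with even backslash run opens one
--         p = 0  # parity counter: backslashes at the end of out
--         opened = False
--         while i < n:
--             c = s[i]
--             i += 1
--             if c == '"':
--                 out.append('"')
--                 if p % 2 == 0:
--                     opened = True
--                     break
--                 p = 0
--             elif c in '\n\r\t':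
--                 pass
--             else:
--                 out.append(c)
--                 p = p + 1 if c == '\\' else 0
--         if not opened:
--             break
--         # --- inside a string: escape control chars until an unescaped quote closes it
--         p = 0
--         closed = False
--         while i < n:
--             c = s[i]
--             if c == '\\' and i + 1 < n and s[i + 1] in ESCAPES:
--                 out.append('\\')
--                 out.append(s[i + 1])
--                 p = p + 2 if s[i + 1] == '\\' else 0
--                 i += 2
--                 continue
--             i += 1
--             if c == '"':
--                 out.append('"')
--                 if p % 2 == 0:
--                     closed = True
--                     break
--                 p = 0
--             elif c == '\n':
--                 out.append('\\n')
--                 p = 0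
--             elif c == '\r':
--                 pass
--             elif c == '\t':
--                 out.append('\\t')
--                 p = 0
--             elif c == '\\':
--                 out.append('\\')
--                 p += 1
--             else:
--                 out.append(c)
--                 p = 0
--         if not closed:
--             break
--
--     cleaned = "".join(out).strip()
--     return cleaned if cleaned[:1] in ('{', '[') else '{}'
-- ===== Notes on version B (the rewrite author's own statement) =====
-- stated objective: alternative
-- what changed: A is one flag-driven loop that rescans the output buffer backwards at every quote to count trailing backslashes; B is a two-state scanner (a separate outside-string loop and inside-string loop, mutual recursion in the port) that maintains the backslash-run parity incrementally, so the inner backward rescan disappears.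
import Mathlib
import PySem

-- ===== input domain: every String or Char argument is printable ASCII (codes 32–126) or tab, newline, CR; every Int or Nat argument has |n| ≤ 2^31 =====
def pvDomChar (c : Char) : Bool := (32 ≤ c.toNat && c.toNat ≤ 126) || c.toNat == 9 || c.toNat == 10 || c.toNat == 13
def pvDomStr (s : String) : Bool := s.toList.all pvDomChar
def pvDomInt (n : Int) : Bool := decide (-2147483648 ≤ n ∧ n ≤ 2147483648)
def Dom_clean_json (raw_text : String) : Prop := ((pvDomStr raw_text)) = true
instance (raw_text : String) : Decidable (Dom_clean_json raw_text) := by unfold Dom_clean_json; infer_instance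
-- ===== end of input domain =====

-- B replaces A's flag-driven loop (which rescans the output backwards at every quote)
-- by a two-state scanner: separate outside-string and inside-string loops carrying the
-- backslash-run parity incrementally; same value everywhere.

-- helpers shared by the two ports because the corresponding Python lines are
-- identical in Source A and Source B (the ``` extraction and the quote-char stripping):
-- '`\'"' strip set
def pvQuoteSet : List Char := ['`', '\'', '"']

-- x.lstrip('`\'"') on chars (exact: drop leading chars of the set)
def pvLstripQ (l : List Char) : List Char := l.dropWhile (fun c => c ∈ pvQuoteSet)

-- x.rstrip('`\'"') on chars (exact: drop trailing chars of the set)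
def pvRstripQ (l : List Char) : List Char := ((l.reverse.dropWhile (fun c => c ∈ pvQuoteSet))).reverse

-- the ``` / ```json extraction, identical lines in both Pythons
def pvExtract (raw : String) : List Char :=
  if PySem.Str.isIn "```json" raw then
    let parts := (PySem.Str.split? raw "```json").getD []
    let tail := ((PySem.List.pyGet? parts (-1)).getD "")
    let parts2 := (PySem.Str.split? tail "```").getD []
    ((PySem.List.pyGet? parts2 0).getD "").toList
  else if PySem.Str.isIn "```" raw then
    let parts := (PySem.Str.split? raw "```").getD []
    if 3 ≤ parts.length then ((PySem.List.pyGet? parts 1).getD "").toList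
    else ((PySem.List.pyGet? parts (-1)).getD "").toList
  else raw.toList

-- raw.strip().lstrip('`\'"').rstrip('`\'"') applied after extraction (identical in both Pythons)
def pvPrepared (raw : String) : List Char :=
  pvRstripQ (pvLstripQ (PySem.Chars.strip (pvExtract raw)))

-- the JSON escape characters ['"', '\\', '/', 'b', 'f', 'n', 'r', 't', 'u']
def pvEscChars : List Char := ['"', '\\', '/', 'b', 'f', 'n', 'r', 't', 'u']

-- ===== PORT A =====
-- A's backward scan 'for j in range(len(result)-1, -1, -1): …' = count leading '\\' of result.reverse
def pvNumBsRev : List Char → Nat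
  | [] => 0
  | c :: r => if c = '\\' then pvNumBsRev r + 1 else 0

-- the branches after A's 'continue' escape branch (shared by the 1- and ≥2-char cases)
def pvStepA (c : Char) (inS : Bool) (res : List Char) : Bool × List Char :=
  if c = '"' then
    ((if pvNumBsRev res.reverse % 2 = 0 then !inS else inS), res ++ ['"'])
  else if inS && c = '\n' then (inS, res ++ ['\\', 'n'])
  else if inS && c = '\r' then (inS, res)
  else if inS && c = '\t' then (inS, res ++ ['\\', 't'])
  else if !inS && (c = '\n' || c = '\r' || c = '\t') then (inS, res)
  else (inS, res ++ [c])

-- A's while loop over raw_text[i:], state (in_string, result); the first branch consumes two chars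
def pvLoopA : List Char → Bool → List Char → List Char
  | [], _, res => res
  | [c], inS, res => (pvStepA c inS res).2
  | c :: nc :: rest, inS, res =>
    if c = '\\' && inS && pvEscChars.contains nc then
      pvLoopA rest inS (res ++ [c, nc])
    else
      let p := pvStepA c inS res
      pvLoopA (nc :: rest) p.1 p.2
termination_by l => l.length

def clean_json (raw_text : String) : String :=
  if raw_text = "" then "{}"
  else
    let cleaned := PySem.Chars.strip (pvLoopA (pvPrepared raw_text) false [])
    if !PySem.Chars.startswith cleaned ['{'] && !PySem.Chars.startswith cleaned ['['] then "{}"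
    else String.ofList cleaned

-- ===== PORT B =====
-- Source B's two-state scanner: pvOutStr is the outer 'outside a string' loop, pvInStr the
-- inner 'inside a string' loop (its two-char escape lookahead), pvInStep its single-char
-- elif chain; p is Source B's incremental backslash-run parity counter.
mutual
def pvOutStr : List Char → Nat → List Char → List Char
  | [], _, res => res
  | c :: rest, p, res =>
    if c = '"' then
      if p % 2 = 0 then pvInStr rest 0 (res ++ ['"'])
      else pvOutStr rest 0 (res ++ ['"'])
    else if c = '\n' || c = '\r' || c = '\t' then
      pvOutStr rest p res
    else
      pvOutStr rest (if c = '\\' then p + 1 else 0) (res ++ [c])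
termination_by l _ _ => (l.length, 1)

def pvInStr : List Char → Nat → List Char → List Char
  | [], _, res => res
  | [c], p, res => pvInStep c [] p res
  | c :: nc :: rest, p, res =>
    if c = '\\' && pvEscChars.contains nc then
      pvInStr rest (if nc = '\\' then p + 2 else 0) (res ++ ['\\', nc])
    else
      pvInStep c (nc :: rest) p res
termination_by l _ _ => (l.length, 1)

def pvInStep (c : Char) (rest : List Char) (p : Nat) (res : List Char) : List Char :=
  if c = '"' then
    if p % 2 = 0 then pvOutStr rest 0 (res ++ ['"'])
    else pvInStr rest 0 (res ++ ['"'])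
  else if c = '\n' then pvInStr rest 0 (res ++ ['\\', 'n'])
  else if c = '\r' then pvInStr rest p res
  else if c = '\t' then pvInStr rest 0 (res ++ ['\\', 't'])
  else if c = '\\' then pvInStr rest (p + 1) (res ++ ['\\'])
  else pvInStr rest 0 (res ++ [c])
termination_by (rest.length + 1, 0)
end

def clean_json_alt (raw_text : String) : String :=
  if raw_text = "" then "{}"
  else
    let cleaned := PySem.Chars.strip (pvOutStr (pvPrepared raw_text) 0 [])
    if !PySem.Chars.startswith cleaned ['{'] && !PySem.Chars.startswith cleaned ['['] then "{}"
    else String.ofList cleaned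

-- ===== PRECONDITION & SPEC =====
def Spec_clean_json (raw_text : String) (out : String) : Prop := out = clean_json_alt raw_text
instance (raw_text : String) (out : String) : Decidable (Spec_clean_json raw_text out) := by unfold Spec_clean_json; infer_instance

-- ===== CLAIM =====
def Claim_equal_clean_json : Prop := ∀ (raw_text : String), Dom_clean_json raw_text → Spec_clean_json raw_text (clean_json raw_text)

-- ===== LEMMAS AND PROOFS =====

lemma pvNumBsRev_append (res : List Char) (c : Char) :
    pvNumBsRev (res ++ [c]).reverse = if c = '\\' then pvNumBsRev res.reverse + 1 else 0 := by
  simp [pvNumBsRev]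

lemma pvNumBsRev_append2 (res : List Char) (c d : Char) :
    pvNumBsRev (res ++ [c, d]).reverse =
      if d = '\\' then (if c = '\\' then pvNumBsRev res.reverse + 1 else 0) + 1 else 0 := by
  have : res ++ [c, d] = (res ++ [c]) ++ [d] := by simp
  rw [this, pvNumBsRev_append, pvNumBsRev_append]

-- B's two loops run A's loop: p = trailing-backslash count of res, state = which loop
lemma pvLoop_eq (l : List Char) (inS : Bool) (res : List Char) :
    pvLoopA l inS res =
      cond inS (pvInStr l (pvNumBsRev res.reverse) res)
        (pvOutStr l (pvNumBsRev res.reverse) res) := by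
  induction l, inS, res using pvLoopA.induct with
  | case1 inS res =>
    cases inS <;> simp [pvLoopA, pvInStr, pvOutStr]
  | case2 c inS res =>
    cases inS <;>
      simp only [pvLoopA, pvStepA, pvInStr, pvInStep, pvOutStr, Bool.true_and, Bool.false_and,
        if_false, Bool.false_eq_true, Bool.not_true, Bool.not_false, cond_true, cond_false] <;>
      split_ifs <;>
      simp_all
  | case3 c nc rest inS res h ih =>
    have hc : c = '\\' := by
      rcases Bool.and_eq_true_iff.mp h with ⟨h', _⟩
      rcases Bool.and_eq_true_iff.mp h' with ⟨h'', _⟩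
      exact of_decide_eq_true h''
    have hS : inS = true := by
      rcases Bool.and_eq_true_iff.mp h with ⟨h', _⟩
      exact (Bool.and_eq_true_iff.mp h').2
    have hnc : pvEscChars.contains nc = true := (Bool.and_eq_true_iff.mp h).2
    subst hc hS
    rw [pvLoopA, if_pos h, ih]
    simp only [cond_true]
    rw [pvInStr, if_pos (by simp_all)]
    rcases eq_or_ne nc '\\' with h2 | h2
    · subst h2
      have hb : pvNumBsRev (res ++ ['\\', '\\']).reverse = pvNumBsRev res.reverse + 2 := by
        rw [pvNumBsRev_append2]; simp
      rw [if_pos rfl, hb]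
    · have hb : pvNumBsRev (res ++ ['\\', nc]).reverse = 0 := by
        rw [pvNumBsRev_append2]; simp [h2]
      rw [if_neg h2, hb]
  | case4 c nc rest inS res h x ih =>
    have hx : x = pvStepA c inS res := rfl
    rw [pvLoopA]
    simp only [h, if_false, Bool.false_eq_true]
    cases inS with
    | false =>
      simp only [cond_false]
      rw [pvOutStr, ih, hx]
      by_cases h1 : c = '"'
      · subst h1
        by_cases hp : pvNumBsRev res.reverse % 2 = 0 <;>
          simp [pvStepA, hp, pvNumBsRev]
      · by_cases hw : c = '\n' ∨ c = '\r' ∨ c = '\t'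
        · rcases hw with hw | hw | hw <;> subst hw <;> simp [pvStepA]
        · push Not at hw
          simp [pvStepA, h1, hw.1, hw.2.1, hw.2.2, pvNumBsRev]
    | true =>
      simp only [cond_true]
      have hesc : (decide (c = '\\') && pvEscChars.contains nc) = false := by
        simpa using h
      rw [pvInStr, if_neg (by rw [hesc]; exact Bool.false_ne_true), pvInStep, ih, hx]
      by_cases h1 : c = '"'
      · subst h1
        by_cases hp : pvNumBsRev res.reverse % 2 = 0 <;>
          simp [pvStepA, hp, pvNumBsRev]
      · by_cases h2 : c = '\n'
        · subst h2; simp [pvStepA, pvNumBsRev]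
        · by_cases h3 : c = '\r'
          · subst h3; simp [pvStepA]
          · by_cases h4 : c = '\t'
            · subst h4; simp [pvStepA, pvNumBsRev]
            · by_cases h5 : c = '\\'
              · subst h5; simp [pvStepA, h1, h2, h3, h4, pvNumBsRev]
              · simp [pvStepA, h1, h2, h3, h4, h5, pvNumBsRev]

-- ===== VERDICT =====
theorem clean_json_spec : Claim_equal_clean_json := by
  intro raw _
  unfold Spec_clean_json clean_json clean_json_alt
  by_cases h : raw = ""
  · simp [h]
  · have := pvLoop_eq (pvPrepared raw) false []
    simp only [List.reverse_nil, pvNumBsRev, cond_false] at this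
    simp [h, this]
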